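-- pv_equiv track=rewrite | github.com/Tenykim1109/Problem-Solving | Programmers/숫자 게임.py | solution
-- ===== SOURCE A (Python) =====
-- def solution(A, B):
--     answer = 0
--     A.sort()
--     B.sort()
--
--     aIdx = 0
--
--     for i in range(len(A)):
--         if A[aIdx] < B[i]:
--             answer += 1
--             aIdx += 1
--
--     return answer
-- ===== SOURCE B (Python) =====
-- def solution(A, B):
--     A.sort()
--     B.sort()
--     n = len(A)
--     # answer = largest k such that the k largest of B's n smallest beat A's k smallest pointwise
--     def feasible(k):
--         for i in range(k):
--             if B[n - k + i] <= A[i]: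
--                 return False
--         return True
--     lo, hi = 0, n
--     while lo < hi:
--         mid = (lo + hi + 1) // 2
--         if feasible(mid):
--             lo = mid
--         else:
--             hi = mid - 1
--     return lo
-- ===== Notes on version B (the rewrite author's own statement) =====
-- stated objective: alternative
-- what changed: Replaces A's single-pass greedy matching counter with a binary search on the answer k, using the Hall-type feasibility check 'the k largest of B's n smallest beat A's k smallest pointwise'; equivalence rests on proving the greedy counter is the maximum feasible k.
import Mathlib
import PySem

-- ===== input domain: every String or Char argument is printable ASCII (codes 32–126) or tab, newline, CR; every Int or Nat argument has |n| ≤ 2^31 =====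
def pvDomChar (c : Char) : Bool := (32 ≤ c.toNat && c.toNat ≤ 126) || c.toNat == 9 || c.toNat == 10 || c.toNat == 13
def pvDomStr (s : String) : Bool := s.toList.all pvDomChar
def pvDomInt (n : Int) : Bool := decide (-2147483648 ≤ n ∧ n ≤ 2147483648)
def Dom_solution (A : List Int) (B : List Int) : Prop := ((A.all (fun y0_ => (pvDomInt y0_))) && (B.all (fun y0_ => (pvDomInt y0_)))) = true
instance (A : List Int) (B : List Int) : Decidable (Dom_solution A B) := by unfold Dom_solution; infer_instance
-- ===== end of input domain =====

-- B replaces A's one-pass greedy matching counter by a binary search on the answer k with a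
-- pointwise (Hall-type) feasibility check (alternative algorithm, same O(n log n) cost); both
-- Pythons sort A and B IN PLACE (a caller-visible mutation, identical in A and B) — the
-- equivalence proved here is about the return value.

-- ===== PORT A =====
def solution (A : List Int) (B : List Int) : Int :=
  let As := PySem.List.sorted A (fun x => x) false
  let Bs := PySem.List.sorted B (fun x => x) false
  let st := (PySem.List.pyRange 0 (As.length : Int) 1).foldl
    (fun (s : Int × Int) i =>
      if PySem.List.pyGetD As s.2 0 < PySem.List.pyGetD Bs i 0 then (s.1 + 1, s.2 + 1) else s)
    (0, 0)
  st.1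

-- ===== PORT B =====
-- feasible(k): for i in range(k): if B[n-k+i] <= A[i]: return False; return True
-- (only called with k ≤ n ≤ len(B), so the plain Nat/getD indexing is exact there)
def pvFeasible (As Bs : List Int) (n k : Nat) : Bool :=
  (List.range k).all (fun i => !(Bs.getD (n - k + i) 0 ≤ As.getD i 0))

-- while lo < hi: mid = (lo+hi+1)//2; if feasible(mid): lo = mid else: hi = mid - 1
-- (structural recursion on a fuel counter d; hi - lo shrinks every iteration, so fuel n is enough)
def pvBsearch (As Bs : List Int) (n : Nat) : Nat → Nat → Nat → Nat
  | 0, lo, _ => lo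
  | d + 1, lo, hi =>
    if lo < hi then
      if pvFeasible As Bs n ((lo + hi + 1) / 2) then pvBsearch As Bs n d ((lo + hi + 1) / 2) hi
      else pvBsearch As Bs n d lo ((lo + hi + 1) / 2 - 1)
    else lo

def solution_alt (A : List Int) (B : List Int) : Int :=
  let As := PySem.List.sorted A (fun x => x) false
  let Bs := PySem.List.sorted B (fun x => x) false
  let n := As.length
  (pvBsearch As Bs n n 0 n : Int)

-- ===== PRECONDITION & SPEC =====
-- Pre_ excludes exactly the inputs where A raises IndexError (B[i] out of range when len(A) > len(B));
-- B raises there too.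
def Pre_solution (A : List Int) (B : List Int) : Prop := A.length ≤ B.length
instance (A : List Int) (B : List Int) : Decidable (Pre_solution A B) := by unfold Pre_solution; infer_instance
def pvWitness_solution : List Int × List Int := ([5, 1, 3], [2, 6, 4, 0])

def Spec_solution (A : List Int) (B : List Int) (out : Int) : Prop := out = solution_alt A B
instance (A : List Int) (B : List Int) (out : Int) : Decidable (Spec_solution A B out) := by unfold Spec_solution; infer_instance

-- ===== CLAIM (what is proved, stated in full; the proofs are below) =====
def Claim_equal_solution : Prop := ∀ (A : List Int) (B : List Int), Dom_solution A B → Pre_solution A B → Spec_solution A B (solution A B)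

-- ===== LEMMAS AND PROOFS =====

-- A's loop as a counter recurrence: aIdx always equals answer, so the state is one number.
def gcount (As Bs : List Int) : Nat → Nat
  | 0 => 0
  | j + 1 =>
    if As.getD (gcount As Bs j) 0 < Bs.getD j 0 then gcount As Bs j + 1 else gcount As Bs j

theorem gcount_le (As Bs : List Int) (j : Nat) : gcount As Bs j ≤ j := by
  induction j with
  | zero => simp [gcount]
  | succ j ih => simp only [gcount]; split_ifs <;> omega

theorem gcount_mono (As Bs : List Int) (j : Nat) : gcount As Bs j ≤ gcount As Bs (j + 1) := by
  simp only [gcount]; split_ifs <;> omega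

theorem foldA_eq_gcount (As Bs : List Int) (j : Nat) :
    (PySem.List.pyRange 0 ((j : Nat) : Int) 1).foldl
      (fun (s : Int × Int) i =>
        if PySem.List.pyGetD As s.2 0 < PySem.List.pyGetD Bs i 0 then (s.1 + 1, s.2 + 1) else s)
      (0, 0)
    = ((gcount As Bs j : Int), (gcount As Bs j : Int)) := by
  induction j with
  | zero => simp [PySem.List.pyRange_one_eq_nil, gcount]
  | succ j ih =>
    have hc : ((j + 1 : Nat) : Int) = ((j : Nat) : Int) + 1 := by push_cast; ring
    rw [hc, PySem.List.pyRange_one_succ_right (by positivity), List.foldl_append, ih]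
    simp only [List.foldl_cons, List.foldl_nil, PySem.List.pyGetD_natCast, gcount]
    split_ifs with h
    · push_cast; rfl
    · rfl

theorem sorted_getD_le (l : List Int) (h : l.Pairwise (· ≤ ·)) (p q : Nat)
    (hpq : p ≤ q) (hq : q < l.length) : l.getD p 0 ≤ l.getD q 0 := by
  rcases Nat.eq_or_lt_of_le hpq with heq | hlt
  · rw [heq]
  · rw [List.getD_eq_getElem l 0 (by omega), List.getD_eq_getElem l 0 hq]
    exact List.pairwise_iff_getElem.mp h p q (by omega) hq hlt

-- direction 1: the greedy count is feasible — its i-th matched element As[i] is beaten by Bs[j-g+i]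
theorem gcount_feas (As Bs : List Int) (hB : Bs.Pairwise (· ≤ ·)) (j : Nat)
    (hj : j ≤ Bs.length) :
    ∀ i < gcount As Bs j, As.getD i 0 < Bs.getD (j - gcount As Bs j + i) 0 := by
  induction j with
  | zero => simp [gcount]
  | succ j ih =>
    have hle := gcount_le As Bs j
    intro i hi
    simp only [gcount] at hi ⊢
    split_ifs at hi ⊢ with h
    · rcases Nat.lt_or_ge i (gcount As Bs j) with hlt | hge
      · have := ih (by omega) i hlt
        have hidx : j + 1 - (gcount As Bs j + 1) + i = j - gcount As Bs j + i := by omega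
        rw [hidx]; exact this
      · have hieq : i = gcount As Bs j := by omega
        have hidx : j + 1 - (gcount As Bs j + 1) + i = j := by omega
        rw [hidx, hieq]; exact h
    · have h1 := ih (by omega) i hi
      have h2 : Bs.getD (j - gcount As Bs j + i) 0 ≤ Bs.getD (j + 1 - gcount As Bs j + i) 0 :=
        sorted_getD_le Bs hB _ _ (by omega) (by omega)
      omega

-- direction 2: every feasible k is at most the greedy count
theorem gcount_ge (As Bs : List Int) (n k : Nat) (hk : k ≤ n)
    (hfeas : ∀ i < k, As.getD i 0 < Bs.getD (n - k + i) 0) :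
    k ≤ gcount As Bs n := by
  have key : ∀ j ≤ n, j - (n - k) ≤ gcount As Bs j := by
    intro j hj
    induction j with
    | zero => omega
    | succ j ih =>
      have hmono := gcount_mono As Bs j
      have hle := gcount_le As Bs j
      rcases Nat.lt_or_ge (j - (n - k)) (gcount As Bs j) with hlt | hge
      · omega
      · have hgj : gcount As Bs j ≤ j - (n - k) := hge
        by_cases hcase : j + 1 ≤ n - k
        · omega
        · have hEq : gcount As Bs j = j - (n - k) := by
            have := ih (by omega); omega
          have hik : gcount As Bs j < k := by omega
          have hidx : n - k + gcount As Bs j = j := by omega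
          have := hfeas (gcount As Bs j) hik
          rw [hidx] at this
          simp only [gcount, this, if_pos]
          omega
  have := key n (le_refl n)
  omega

theorem pvFeasible_iff (As Bs : List Int) (n k : Nat) :
    pvFeasible As Bs n k = true ↔ ∀ i < k, As.getD i 0 < Bs.getD (n - k + i) 0 := by
  simp only [pvFeasible, List.all_eq_true, List.mem_range, Bool.not_eq_eq_eq_not,
    Bool.not_true, decide_eq_false_iff_not, not_le]

-- feasibility is downward closed (uses Bs sorted)
theorem pvFeasible_mono (As Bs : List Int) (hB : Bs.Pairwise (· ≤ ·)) (n : Nat)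
    (hn : n ≤ Bs.length) (k k' : Nat) (hkk : k ≤ k') (hk' : k' ≤ n)
    (h : pvFeasible As Bs n k' = true) : pvFeasible As Bs n k = true := by
  rw [pvFeasible_iff] at h ⊢
  intro i hi
  have h1 := h i (by omega)
  have h2 : Bs.getD (n - k' + i) 0 ≤ Bs.getD (n - k + i) 0 :=
    sorted_getD_le Bs hB _ _ (by omega) (by omega)
  omega

-- the binary search returns the maximum feasible value M it brackets
theorem pvBsearch_eq (As Bs : List Int) (hB : Bs.Pairwise (· ≤ ·)) (n : Nat)
    (hn : n ≤ Bs.length) (M : Nat) (hM : pvFeasible As Bs n M = true)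
    (hmax : ∀ k, k ≤ n → pvFeasible As Bs n k = true → k ≤ M) :
    ∀ d lo hi, hi - lo ≤ d → lo ≤ M → M ≤ hi → hi ≤ n →
      pvBsearch As Bs n d lo hi = M := by
  intro d
  induction d with
  | zero =>
    intro lo hi h1 h2 h3 h4
    simp only [pvBsearch]
    omega
  | succ d ih =>
    intro lo hi h1 h2 h3 h4
    simp only [pvBsearch]
    by_cases hlh : lo < hi
    · simp only [hlh, if_true]
      by_cases hf : pvFeasible As Bs n ((lo + hi + 1) / 2) = true
      · simp only [hf, if_true]
        have hmid : (lo + hi + 1) / 2 ≤ M := hmax _ (by omega) hf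
        exact ih _ _ (by omega) hmid h3 h4
      · simp only [hf]
        have hmid : M < (lo + hi + 1) / 2 := by
          by_contra hc
          exact hf (pvFeasible_mono As Bs hB n hn _ M (by omega) (by omega) hM)
        exact ih _ _ (by omega) h2 (by omega) (by omega)
    · simp only [hlh, if_false]
      omega

-- ===== VERDICT (by name: the statement is the Claim_ definition above) =====
theorem solution_spec : Claim_equal_solution := by
  intro A B _ hpre
  unfold Pre_solution at hpre
  unfold Spec_solution solution solution_alt
  set As := PySem.List.sorted A (fun x => x) false with hAs
  set Bs := PySem.List.sorted B (fun x => x) false with hBs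
  have hlen : As.length ≤ Bs.length := by
    rw [hAs, hBs, PySem.List.length_sorted, PySem.List.length_sorted]
    exact hpre
  have hsortB : Bs.Pairwise (· ≤ ·) := PySem.List.sorted_pairwise B (fun x => x)
  have hA := foldA_eq_gcount As Bs As.length
  have hfeasM : pvFeasible As Bs As.length (gcount As Bs As.length) = true := by
    rw [pvFeasible_iff]
    exact gcount_feas As Bs hsortB As.length hlen
  have hmax : ∀ k, k ≤ As.length → pvFeasible As Bs As.length k = true → k ≤ gcount As Bs As.length := by
    intro k hk hfk
    exact gcount_ge As Bs As.length k hk ((pvFeasible_iff As Bs As.length k).mp hfk)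
  have hBside : pvBsearch As Bs As.length As.length 0 As.length = gcount As Bs As.length :=
    pvBsearch_eq As Bs hsortB As.length hlen (gcount As Bs As.length) hfeasM hmax
      As.length 0 As.length (by omega) (by omega) (gcount_le As Bs As.length) (le_refl _)
  simp only [hA, hBside]
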